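-- pv_equiv track=rewrite | github.com/pypi-data/pypi-mirror-66 | packages/Py34/Py34-0.0.3-py3-none-any.whl/py34/Py34.py | _filter_urls
-- ===== SOURCE A (Python) =====
-- def _filter_urls(urls, downloadImages=True, downloadGifs=True, downloadVideos=True):
--     """
--         :param urls: List of urls gathered using the getImageURLs function
--         :param downloadImages: Boolean if the user wants to download images
--         :param downloadGifs: Boolean if the user wants to download gifs
--         :param downloadVideos: Boolean if the user wants to download videos
--
--         :return: List of filtered urls
--     """
--     all_urls = []
--     videos = []
--     gifs = []
--     images = []
--
--     for url in urls:
--         if url.lower().endswith('.webm') and downloadVideos: # if the file is a webm, add it to the videos list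
--             videos.append(url)
--         elif url.lower().endswith('.gif') and downloadGifs: # if the file is a gif, add it to the gifs list
--             gifs.append(url)
--         if url.lower().endswith(('.png', '.jpg', '.jpeg')) and downloadImages: # if the file is a picture, add it to the images list
--             images.append(url)
--
--     # we want to put the pictures in the list first, then we can add the videos and the gifs
--
--     for url in images:
--         all_urls.append(url)
--
--     for url in gifs:
--         all_urls.append(url)
--
--     for url in videos:
--         all_urls.append(url)
--
--     return all_urls
-- ===== SOURCE B (Python) =====
-- def _filter_urls(urls, downloadImages=True, downloadGifs=True, downloadVideos=True):
--     """
--         :param urls: List of urls gathered using the getImageURLs function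
--         :param downloadImages: Boolean if the user wants to download images
--         :param downloadGifs: Boolean if the user wants to download gifs
--         :param downloadVideos: Boolean if the user wants to download videos
--
--         :return: List of filtered urls
--     """
--     images = [u for u in urls if downloadImages and u.lower().endswith(('.png', '.jpg', '.jpeg'))]
--     gifs = [u for u in urls if downloadGifs and u.lower().endswith('.gif')]
--     videos = [u for u in urls if downloadVideos and u.lower().endswith('.webm')]
--     return images + gifs + videos
-- ===== Notes on version B (the rewrite author's own statement) =====
-- stated objective: simpler
-- what changed: Replaces the single bucketing loop with three mutable accumulator lists and a second concatenation phase by three independent filter comprehensions concatenated directly; correctness relies on the extensions being mutually exclusive.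
import Mathlib
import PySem

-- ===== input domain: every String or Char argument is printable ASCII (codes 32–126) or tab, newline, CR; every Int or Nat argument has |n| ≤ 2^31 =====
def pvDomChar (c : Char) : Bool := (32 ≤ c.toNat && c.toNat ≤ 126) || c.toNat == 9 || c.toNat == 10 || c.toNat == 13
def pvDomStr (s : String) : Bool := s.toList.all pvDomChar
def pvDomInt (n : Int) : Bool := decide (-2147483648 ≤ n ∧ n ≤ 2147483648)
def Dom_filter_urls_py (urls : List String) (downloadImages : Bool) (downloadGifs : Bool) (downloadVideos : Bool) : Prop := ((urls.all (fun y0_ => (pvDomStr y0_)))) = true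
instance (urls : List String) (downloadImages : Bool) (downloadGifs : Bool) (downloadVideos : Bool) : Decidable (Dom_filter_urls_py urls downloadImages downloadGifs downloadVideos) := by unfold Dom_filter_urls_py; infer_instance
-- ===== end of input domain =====

-- B replaces A's single bucketing loop (three accumulators + a second concatenation phase)
-- by three independent filter passes concatenated directly (objective: simpler).

-- ===== PORT A =====
-- url.lower().endswith(suffix)
def pvEnds (url suffix : String) : Bool := PySem.Str.endswith (PySem.Str.lower url) suffix

-- body of A's bucketing loop, state (videos, gifs, images)
def pvStepA (downloadImages downloadGifs downloadVideos : Bool)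
    (acc : List String × List String × List String) (url : String) :
    List String × List String × List String :=
  let videos := acc.1
  let gifs := acc.2.1
  let images := acc.2.2
  let vg :=
    if pvEnds url ".webm" && downloadVideos then (videos ++ [url], gifs)
    else if pvEnds url ".gif" && downloadGifs then (videos, gifs ++ [url])
    else (videos, gifs)
  let images :=
    if (pvEnds url ".png" || pvEnds url ".jpg" || pvEnds url ".jpeg") && downloadImages
    then images ++ [url] else images
  (vg.1, vg.2, images)

def filter_urls_py (urls : List String) (downloadImages : Bool) (downloadGifs : Bool) (downloadVideos : Bool) : List String :=
  let st := urls.foldl (pvStepA downloadImages downloadGifs downloadVideos) ([], [], [])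
  -- the three append loops building all_urls
  let all₁ := st.2.2.foldl (fun a u => a ++ [u]) []
  let all₂ := st.2.1.foldl (fun a u => a ++ [u]) all₁
  st.1.foldl (fun a u => a ++ [u]) all₂

-- ===== PORT B =====
def filter_urls_py_alt (urls : List String) (downloadImages : Bool) (downloadGifs : Bool) (downloadVideos : Bool) : List String :=
  (urls.filter (fun u => downloadImages && (pvEnds u ".png" || pvEnds u ".jpg" || pvEnds u ".jpeg")))
  ++ (urls.filter (fun u => downloadGifs && pvEnds u ".gif"))
  ++ (urls.filter (fun u => downloadVideos && pvEnds u ".webm"))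

-- ===== PRECONDITION & SPEC =====
def Spec_filter_urls_py (urls : List String) (downloadImages : Bool) (downloadGifs : Bool) (downloadVideos : Bool) (out : List String) : Prop := out = filter_urls_py_alt urls downloadImages downloadGifs downloadVideos
instance (urls : List String) (downloadImages : Bool) (downloadGifs : Bool) (downloadVideos : Bool) (out : List String) : Decidable (Spec_filter_urls_py urls downloadImages downloadGifs downloadVideos out) := by unfold Spec_filter_urls_py; infer_instance

-- ===== CLAIM (what is proved, stated in full; the proofs are below) =====
def Claim_equal_filter_urls_py : Prop := ∀ (urls : List String) (downloadImages : Bool) (downloadGifs : Bool) (downloadVideos : Bool), Dom_filter_urls_py urls downloadImages downloadGifs downloadVideos → Spec_filter_urls_py urls downloadImages downloadGifs downloadVideos (filter_urls_py urls downloadImages downloadGifs downloadVideos)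

-- ===== LEMMAS AND PROOFS =====

-- a string cannot end (after lowering) with both ".gif" and ".webm"
theorem pvEnds_gif_not_webm (u : String) (h : pvEnds u ".gif" = true) : pvEnds u ".webm" = false := by
  by_contra hw
  simp only [Bool.not_eq_false] at hw
  unfold pvEnds at h hw
  simp only [PySem.Str.endswith_eq] at h hw
  rw [PySem.Chars.endswith_iff] at h hw
  rcases List.suffix_or_suffix_of_suffix h hw with hs | hs
  · exact absurd hs (by decide)
  · exact absurd hs (by decide)

-- one step of the loop, as conditional appends
theorem pvStepA_eq (dI dG dV : Bool) (v g i : List String) (u : String) :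
    pvStepA dI dG dV (v, g, i) u =
      (if pvEnds u ".webm" && dV then v ++ [u] else v,
       if !(pvEnds u ".webm" && dV) && (pvEnds u ".gif" && dG) then g ++ [u] else g,
       if (pvEnds u ".png" || pvEnds u ".jpg" || pvEnds u ".jpeg") && dI then i ++ [u] else i) := by
  unfold pvStepA
  by_cases hw : (pvEnds u ".webm" && dV) = true <;>
    by_cases hg : (pvEnds u ".gif" && dG) = true <;> simp [hw, hg]

-- the accumulator loop, characterised
theorem pvLoopA (dI dG dV : Bool) : ∀ (urls v g i : List String),
    urls.foldl (pvStepA dI dG dV) (v, g, i)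
    = (v ++ urls.filter (fun u => pvEnds u ".webm" && dV),
       g ++ urls.filter (fun u => !(pvEnds u ".webm" && dV) && (pvEnds u ".gif" && dG)),
       i ++ urls.filter (fun u => (pvEnds u ".png" || pvEnds u ".jpg" || pvEnds u ".jpeg") && dI)) := by
  intro urls
  induction urls with
  | nil => intro v g i; simp
  | cons u rest ih =>
    intro v g i
    rw [List.foldl_cons, pvStepA_eq, ih]
    simp only [List.filter_cons]
    by_cases hw : (pvEnds u ".webm" && dV) = true <;>
      by_cases hg : (pvEnds u ".gif" && dG) = true <;>
        by_cases hi : ((pvEnds u ".png" || pvEnds u ".jpg" || pvEnds u ".jpeg") && dI) = true <;>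
          simp [hw, hg, hi]

-- append loop = append
theorem pvFoldAppend : ∀ (l init : List String), l.foldl (fun a u => a ++ [u]) init = init ++ l := by
  intro l
  induction l with
  | nil => simp
  | cons x xs ih => intro init; simp [List.foldl_cons, ih]

-- ===== VERDICT (by name: the statement is the Claim_ definition above) =====
theorem filter_urls_py_spec : Claim_equal_filter_urls_py := by
  intro urls dI dG dV _
  unfold Spec_filter_urls_py filter_urls_py filter_urls_py_alt
  rw [pvLoopA dI dG dV urls [] [] []]
  simp only [List.nil_append]
  rw [pvFoldAppend, pvFoldAppend, pvFoldAppend]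
  simp only [List.nil_append, List.append_assoc]
  congr 1
  · exact List.filter_congr (fun u _ => by rw [Bool.and_comm])
  congr 1
  · refine List.filter_congr (fun u _ => ?_)
    by_cases hg : pvEnds u ".gif" = true
    · simp [hg, pvEnds_gif_not_webm u hg, Bool.and_comm]
    · simp at hg; simp [hg]
  · exact List.filter_congr (fun u _ => by rw [Bool.and_comm])
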